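-- pv_equiv track=rewrite | github.com/Prabh-Saini/inconspicuousname | viewport testing.py | stepback
-- ===== SOURCE A (Python) =====
-- def stepback(number: int, maximum: int) -> int:
--     """if number is higher than x return back to 0 and repeat.
--     eg. if number = 7 and maximum = 2 the result is 1
--     because 0 1 2  0 1 2  0 1  (it's starting at 0)"""
--     iteration, result = 0, 0
--     if number <= maximum:
--         return number
--
--     if number <= 0:
--         return 0
--
--     for _ in range(0, number):
--         if result == maximum:
--             result = 0
--         else:
--             result += 1
--
--     return result
-- ===== SOURCE B (Python) =====
-- def stepback(number: int, maximum: int) -> int: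
--     """Branch-free closed form: the counter cycles with period maximum+1, so the
--     wrapped value is number % (maximum+1); taking min with number itself also
--     returns numbers that never needed wrapping (number <= maximum) unchanged."""
--     return min(number, number % (maximum + 1))
-- ===== Notes on version B (the rewrite author's own statement) =====
-- stated objective: faster
-- what changed: Replaces A's O(number) counter simulation and its early-return branches with a single branch-free closed form min(number, number % (maximum+1)).
-- outside the precondition, e.g. on stepback(5, -1): A returns 5, B raises ZeroDivisionError; on stepback(5, -3): A returns 5, B returns -1
import Mathlib
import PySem

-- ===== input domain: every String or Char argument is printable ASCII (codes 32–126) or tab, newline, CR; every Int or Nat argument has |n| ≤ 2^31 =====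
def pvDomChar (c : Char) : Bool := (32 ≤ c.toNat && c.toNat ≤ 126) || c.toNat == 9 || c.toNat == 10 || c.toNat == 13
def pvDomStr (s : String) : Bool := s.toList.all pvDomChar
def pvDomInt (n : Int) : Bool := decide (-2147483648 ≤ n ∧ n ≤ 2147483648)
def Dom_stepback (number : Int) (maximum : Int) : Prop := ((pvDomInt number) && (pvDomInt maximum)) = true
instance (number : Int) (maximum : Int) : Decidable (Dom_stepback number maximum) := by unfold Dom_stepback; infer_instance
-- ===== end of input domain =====

-- B replaces A's O(number) counter simulation and its branches with the branch-free
-- closed form min(number, number % (maximum+1)); Pre_ excludes negative maximum (see Pre_).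


-- ===== PORT A =====
-- literal port: early returns, then the for-loop over range(0, number) updating `result`
def stepback (number : Int) (maximum : Int) : Int :=
  if number ≤ maximum then number
  else if number ≤ 0 then 0
  else
    (PySem.List.pyRange 0 number 1).foldl
      (fun result _ => if result = maximum then 0 else result + 1) 0

-- ===== PORT B =====
def stepback_alt (number : Int) (maximum : Int) : Int :=
  min number (PySem.Int.mod number (maximum + 1))

-- ===== PRECONDITION & SPEC =====
-- Pre_ excludes negative maximum: the function's cycle semantics are undefined there
-- (no cycle of nonpositive length), A's loop accidentally returns number unreduced,
-- and B's modulo raises ZeroDivisionError at maximum = -1 (and yields a Python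
-- negative-divisor remainder below that).
def Pre_stepback (number : Int) (maximum : Int) : Prop := 0 ≤ maximum
instance (number : Int) (maximum : Int) : Decidable (Pre_stepback number maximum) := by
  unfold Pre_stepback; infer_instance
def pvWitness_stepback : Int × Int := (7, 2)

def Spec_stepback (number : Int) (maximum : Int) (out : Int) : Prop := out = stepback_alt number maximum
instance (number : Int) (maximum : Int) (out : Int) : Decidable (Spec_stepback number maximum out) := by unfold Spec_stepback; infer_instance

-- ===== CLAIM (what is proved, stated in full; the proofs are below) =====
def Claim_equal_stepback : Prop := ∀ (number : Int) (maximum : Int), Dom_stepback number maximum → Pre_stepback number maximum → Spec_stepback number maximum (stepback number maximum)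

-- ===== LEMMAS AND PROOFS =====

-- one step of A's counter, on a value already reduced mod (m+1), is the successor mod (m+1)
theorem stepback_step (m n : Int) (hm : 0 ≤ m) :
    (if n % (m + 1) = m then (0 : Int) else n % (m + 1) + 1) = (n + 1) % (m + 1) := by
  have hpos : (0 : Int) < m + 1 := by omega
  have hr0 : 0 ≤ n % (m + 1) := Int.emod_nonneg n (by omega)
  have hr1 : n % (m + 1) < m + 1 := Int.emod_lt_of_pos n hpos
  have hdecomp : n + 1 = (n % (m + 1) + 1) + (m + 1) * (n / (m + 1)) := by
    have := Int.emod_add_mul_ediv n (m + 1); omega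
  rw [hdecomp, Int.add_mul_emod_self_left]
  by_cases h : n % (m + 1) = m
  · simp [h]
  · rw [if_neg h]
    exact (Int.emod_eq_of_lt (by omega) (by omega)).symm

-- A's loop computes the running count modulo m+1
theorem stepback_loop (m : Int) (hm : 0 ≤ m) (n : Nat) :
    (PySem.List.pyRange 0 n 1).foldl
      (fun result _ => if result = m then 0 else result + 1) 0 = (n : Int) % (m + 1) := by
  induction n with
  | zero => simp [PySem.List.pyRange_one_eq_nil]
  | succ k ih =>
    have h : PySem.List.pyRange 0 ((k : Int) + 1) 1
        = PySem.List.pyRange 0 (k : Int) 1 ++ [(k : Int)] :=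
      PySem.List.pyRange_one_succ_right (by positivity)
    push_cast
    rw [h, List.foldl_append, ih]
    simpa using stepback_step m (k : Int) hm

-- ===== VERDICT (by name: the statement is the Claim_ definition above) =====
theorem stepback_spec : Claim_equal_stepback := by
  intro number maximum _ hpre
  have hm : 0 ≤ maximum := hpre
  have hmod : PySem.Int.mod number (maximum + 1) = number % (maximum + 1) :=
    PySem.Int.mod_eq_emod_of_pos (by omega)
  have hr0 : 0 ≤ number % (maximum + 1) := Int.emod_nonneg number (by omega)
  have hr1 : number % (maximum + 1) < maximum + 1 := Int.emod_lt_of_pos number (by omega)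
  unfold Spec_stepback stepback stepback_alt
  rw [hmod]
  split_ifs with h1 h2
  · -- number ≤ maximum: if 0 ≤ number the remainder is number itself; otherwise it is ≥ 0 > number
    by_cases hnn : 0 ≤ number
    · rw [Int.emod_eq_of_lt hnn (by omega), min_self]
    · exact (min_eq_left (by omega)).symm
  · omega
  · -- number > maximum ≥ 0: loop = number % (maximum+1), which is ≤ maximum < number
    have hn : 0 < number := by omega
    have hcast : ((number.toNat : Int)) = number := Int.toNat_of_nonneg (le_of_lt hn)
    have hloop : (PySem.List.pyRange 0 number 1).foldl
        (fun result _ => if result = maximum then 0 else result + 1) 0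
        = number % (maximum + 1) := by
      rw [← hcast]; exact stepback_loop maximum hm number.toNat
    rw [hloop, (min_eq_right (by omega) : min number (number % (maximum + 1)) = _)]
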